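-- pv_equiv track=rewrite | github.com/Rickard-Martensson/Programmeringsteknik-f-r-matematiker--Pythonkurs- | kamraträttning/labb2/2.py | eq_poly
-- ===== SOURCE A (Python) =====
-- def eq_poly(p_list, q_list):
--     if len(p_list) <= len(q_list):
--         for degree in range(len(q_list)):
--             if degree > len(p_list) - 1:
--                 if q_list[degree] != 0:
--                     return False
--             else:
--                 if q_list[degree] != p_list[degree]:
--                     return False
--         return True
--     else:
--         for degree in range(len(p_list)):
--             if degree > len(q_list) - 1:
--                 if p_list[degree] != 0:
--                     return False
--             else:
--                 if q_list[degree] != p_list[degree]: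
--                     return False
--         return True
-- ===== SOURCE B (Python) =====
-- def eq_poly(p_list, q_list):
--     p = p_list[:]
--     q = q_list[:]
--     while p and p[-1] == 0:
--         p.pop()
--     while q and q[-1] == 0:
--         q.pop()
--     if len(p) != len(q):
--         return False
--     for x, y in zip(p, q):
--         if x != y:
--             return False
--     return True
-- ===== Notes on version B (the rewrite author's own statement) =====
-- stated objective: simpler
-- what changed: B normalizes both lists by stripping trailing zeros and then does one plain equality pass over the zipped pair, instead of A's branch on which list is longer followed by a padded index scan with a per-index range test.
import Mathlib
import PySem

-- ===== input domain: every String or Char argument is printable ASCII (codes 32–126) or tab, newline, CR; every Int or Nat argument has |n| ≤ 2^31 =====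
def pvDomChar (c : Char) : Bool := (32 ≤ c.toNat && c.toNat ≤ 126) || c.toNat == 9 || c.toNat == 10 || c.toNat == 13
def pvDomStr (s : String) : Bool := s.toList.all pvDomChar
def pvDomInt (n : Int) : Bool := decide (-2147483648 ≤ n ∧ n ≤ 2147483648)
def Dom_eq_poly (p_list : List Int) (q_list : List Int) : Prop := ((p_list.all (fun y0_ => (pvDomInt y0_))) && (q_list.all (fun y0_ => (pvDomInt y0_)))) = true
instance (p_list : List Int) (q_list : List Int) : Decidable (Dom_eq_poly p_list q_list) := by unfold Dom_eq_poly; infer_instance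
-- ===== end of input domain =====

-- B normalizes both lists by stripping trailing zeros and compares the trimmed lists in one
-- pass, instead of A's branch on which list is longer followed by a padded index scan (simpler).

-- ===== PORT A =====
-- A's two branches run the same loop body up to which list is the longer one:
-- `s` is the shorter-or-equal list, `l` the longer; indexing l[degree] is in range
-- (degree < l.length), so getD is exact there.
def eqPolyScan (s l : List Int) (degree : Nat) : Bool :=
  if degree < l.length then
    if (degree : Int) > (s.length : Int) - 1 then
      if l.getD degree 0 ≠ 0 then false else eqPolyScan s l (degree + 1)
    else
      if l.getD degree 0 ≠ s.getD degree 0 then false else eqPolyScan s l (degree + 1)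
  else true
termination_by l.length - degree

def eq_poly (p_list : List Int) (q_list : List Int) : Bool :=
  if p_list.length ≤ q_list.length then eqPolyScan p_list q_list 0
  else eqPolyScan q_list p_list 0

-- ===== PORT B =====
-- `while r and r[-1] == 0: r.pop()` — the loop condition is exactly getLast? = some 0
def trimZeros (r : List Int) : List Int :=
  if h : r.getLast? = some 0 then trimZeros r.dropLast else r
termination_by r.length
decreasing_by
  cases r with
  | nil => simp at h
  | cons a t => simp [List.length_dropLast]

def eq_poly_alt (p_list : List Int) (q_list : List Int) : Bool :=
  let p := trimZeros p_list
  let q := trimZeros q_list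
  if p.length ≠ q.length then false
  else (p.zip q).all (fun xy => xy.1 == xy.2)

-- ===== PRECONDITION & SPEC =====
def Spec_eq_poly (p_list : List Int) (q_list : List Int) (out : Bool) : Prop := out = eq_poly_alt p_list q_list
instance (p_list : List Int) (q_list : List Int) (out : Bool) : Decidable (Spec_eq_poly p_list q_list out) := by unfold Spec_eq_poly; infer_instance

-- ===== CLAIM (what is proved, stated in full; the proofs are below) =====
def Claim_equal_eq_poly : Prop := ∀ (p_list : List Int) (q_list : List Int), Dom_eq_poly p_list q_list → Spec_eq_poly p_list q_list (eq_poly p_list q_list)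

-- ===== LEMMAS AND PROOFS =====

-- both programs decide pointwise agreement of the zero-padded coefficient streams
def Agree (p q : List Int) : Prop := ∀ i : Nat, p.getD i 0 = q.getD i 0

theorem eqPolyScan_iff (s l : List Int) (d : Nat) :
    eqPolyScan s l d = true ↔ ∀ i, d ≤ i → i < l.length → s.getD i 0 = l.getD i 0 := by
  induction d using eqPolyScan.induct s l with
  | case1 x hlt hz hzero =>
      rw [eqPolyScan]
      simp only [if_pos hlt, if_pos hz, if_pos hzero]
      constructor
      · intro h; cases h
      · intro h
        have hs : s.getD x 0 = 0 := List.getD_eq_default _ _ (by omega)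
        have := h x le_rfl hlt
        omega
  | case2 x hlt hz hzero ih =>
      rw [eqPolyScan]
      simp only [if_pos hlt, if_pos hz, if_neg hzero, ih]
      constructor
      · intro h i hle hi
        by_cases hxi : i = x
        · subst hxi
          have hs : s.getD i 0 = 0 := List.getD_eq_default _ _ (by omega)
          omega
        · exact h i (by omega) hi
      · intro h i hle hi; exact h i (by omega) hi
  | case3 x hlt hz hne =>
      rw [eqPolyScan]
      simp only [if_pos hlt, if_neg hz, if_pos hne]
      constructor
      · intro h; cases h
      · intro h; exact absurd (h x le_rfl hlt).symm hne
  | case4 x hlt hz hne ih =>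
      rw [eqPolyScan]
      simp only [if_pos hlt, if_neg hz, if_neg hne, ih]
      rw [not_not] at hne
      constructor
      · intro h i hle hi
        by_cases hxi : i = x
        · subst hxi; exact hne.symm
        · exact h i (by omega) hi
      · intro h i hle hi; exact h i (by omega) hi
  | case5 x hge =>
      rw [eqPolyScan]
      simp only [if_neg hge]
      constructor
      · intro _ i hle hi; omega
      · intro _; trivial

theorem trimZeros_getD (r : List Int) (i : Nat) : (trimZeros r).getD i 0 = r.getD i 0 := by
  induction r using trimZeros.induct with
  | case1 r h ih =>
      rw [trimZeros, dif_pos h]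
      have hx0 : r[r.length - 1]? = some 0 := by rw [← List.getLast?_eq_getElem?]; exact h
      rw [ih, List.getD_eq_getElem?_getD, List.getD_eq_getElem?_getD, List.getElem?_dropLast]
      by_cases hi : i < r.length - 1
      · rw [if_pos hi]
      · rw [if_neg hi]
        by_cases he : i = r.length - 1
        · subst he; rw [hx0]; rfl
        · have : r.length ≤ i := by
            have : r ≠ [] := by intro e; subst e; simp at h
            have : 0 < r.length := List.length_pos_iff.mpr this
            omega
          rw [List.getElem?_eq_none (by omega)]
  | case2 r h =>
      rw [trimZeros, dif_neg h]

theorem trimZeros_last (r : List Int) : (trimZeros r).getLast? ≠ some 0 := by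
  induction r using trimZeros.induct with
  | case1 r h ih => rw [trimZeros, dif_pos h]; exact ih
  | case2 r h => rw [trimZeros, dif_neg h]; exact h

theorem eq_of_agree (a b : List Int) (ha : a.getLast? ≠ some 0) (hb : b.getLast? ≠ some 0)
    (hab : ∀ i : Nat, a.getD i 0 = b.getD i 0) : a = b := by
  have hlen : a.length = b.length := by
    by_contra hne
    rcases Nat.lt_or_ge a.length b.length with hlt | hge
    · have hb' : b ≠ [] := by intro e; subst e; simp at hlt
      have h0 : b.getD (b.length - 1) 0 = 0 := by
        rw [← hab, List.getD_eq_default _ _ (by omega)]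
      rw [List.getD_eq_getElem _ _ (by have := List.length_pos_iff.mpr hb'; omega)] at h0
      apply hb
      rw [List.getLast?_eq_getElem?, List.getElem?_eq_getElem (by have := List.length_pos_iff.mpr hb'; omega), h0]
    · have hlt : b.length < a.length := by omega
      have ha' : a ≠ [] := by intro e; subst e; simp at hlt
      have h0 : a.getD (a.length - 1) 0 = 0 := by
        rw [hab, List.getD_eq_default _ _ (by omega)]
      rw [List.getD_eq_getElem _ _ (by have := List.length_pos_iff.mpr ha'; omega)] at h0
      apply ha
      rw [List.getLast?_eq_getElem?, List.getElem?_eq_getElem (by have := List.length_pos_iff.mpr ha'; omega), h0]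
  apply List.ext_getElem hlen
  intro i h1 h2
  have := hab i
  rwa [List.getD_eq_getElem _ _ h1, List.getD_eq_getElem _ _ h2] at this

theorem zip_all_eq (a b : List Int) (h : a.length = b.length) :
    ((a.zip b).all (fun xy => xy.1 == xy.2) = true) ↔ a = b := by
  induction a generalizing b with
  | nil => cases b with
    | nil => simp
    | cons y ys => simp at h
  | cons x xs ih => cases b with
    | nil => simp at h
    | cons y ys =>
        simp only [List.zip_cons_cons, List.all_cons, Bool.and_eq_true, beq_iff_eq, List.cons.injEq]
        rw [ih ys (by simpa using h)]

theorem eq_poly_iff (p q : List Int) : eq_poly p q = true ↔ Agree p q := by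
  unfold eq_poly
  by_cases hle : p.length ≤ q.length
  · rw [if_pos hle, eqPolyScan_iff]
    constructor
    · intro h i
      by_cases hi : i < q.length
      · exact h i (Nat.zero_le _) hi
      · rw [List.getD_eq_default _ _ (by omega), List.getD_eq_default _ _ (by omega)]
    · intro h i _ _; exact h i
  · rw [if_neg hle, eqPolyScan_iff]
    constructor
    · intro h i
      by_cases hi : i < p.length
      · exact (h i (Nat.zero_le _) hi).symm
      · rw [List.getD_eq_default _ _ (by omega), List.getD_eq_default _ _ (by omega)]
    · intro h i _ _; exact (h i).symm

theorem trim_eq_iff (p q : List Int) : trimZeros p = trimZeros q ↔ Agree p q := by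
  constructor
  · intro h i
    rw [← trimZeros_getD p i, ← trimZeros_getD q i, h]
  · intro h
    exact eq_of_agree _ _ (trimZeros_last p) (trimZeros_last q)
      (fun i => by rw [trimZeros_getD, trimZeros_getD]; exact h i)

theorem eq_poly_alt_iff (p q : List Int) : eq_poly_alt p q = true ↔ Agree p q := by
  rw [← trim_eq_iff]
  unfold eq_poly_alt
  by_cases hlen : (trimZeros p).length ≠ (trimZeros q).length
  · rw [if_pos hlen]
    constructor
    · intro h; cases h
    · intro h; exact absurd (congrArg List.length h) hlen
  · rw [if_neg hlen, zip_all_eq _ _ (by omega)]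

-- ===== VERDICT (by name: the statement is the Claim_ definition above) =====
theorem eq_poly_spec : Claim_equal_eq_poly := by
  intro p q _
  unfold Spec_eq_poly
  rw [Bool.eq_iff_iff, eq_poly_iff, eq_poly_alt_iff]
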